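-- pv_equiv track=rewrite | github.com/djoproject/pyshell | pyshell/command/engine.py | _computeTheNextChildToExecute
-- ===== SOURCE A (Python) =====
-- def _computeTheNextChildToExecute(
--                                   cmd,
--                                   current_sub_cmd_index,
--                                   enabling_map):
--     current_sub_cmd_index = min(current_sub_cmd_index, len(cmd) - 1)
--     starting_index = current_sub_cmd_index
--     execute_on_next_data = False
--     while True:
--         # increment
--         starting_index = (starting_index+1) % len(cmd)
--
--         # did it reach the next data ?
--         if starting_index == 0:
--             execute_on_next_data = True
--
--         # is it a valid command to execute ?
--         if (cmd[starting_index][2] and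
--            (enabling_map is None or enabling_map[starting_index])):
--             return execute_on_next_data, starting_index
--
--         # stop condition
--         if starting_index == current_sub_cmd_index:
--             return execute_on_next_data, -1
-- ===== SOURCE B (Python) =====
-- def _computeTheNextChildToExecute(cmd, current_sub_cmd_index, enabling_map):
--     n = len(cmd)
--     current = min(current_sub_cmd_index, n - 1)
--     valid = [i for i in range(n)
--              if cmd[i][2] and (enabling_map is None or enabling_map[i])]
--     if not valid:
--         return True, -1
--     # circular successor of current = valid index with minimal modular distance
--     target = min(valid, key=lambda i: (i - current - 1) % n)
--     return target <= current, target
-- ===== Notes on version B (the rewrite author's own statement) =====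
-- stated objective: alternative
-- what changed: Instead of A's circular sequential scan with a wrap flag, B first materialises the list of all valid indices in one comprehension and then selects the answer by argmin of the modular distance key (i - current - 1) % n, deriving the wrap flag arithmetically as target <= current.
-- outside the precondition, e.g. on _computeTheNextChildToExecute([(0, 0, True)], -2, None): A returns (True, 0), B returns (False, 0)
-- crash fix: On empty cmd A raises ZeroDivisionError from '% len(cmd)' while B finds no valid index and returns (True, -1). — e.g. on _computeTheNextChildToExecute([], 0, none): A raises ZeroDivisionError, B returns (true, -1)
import Mathlib
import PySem

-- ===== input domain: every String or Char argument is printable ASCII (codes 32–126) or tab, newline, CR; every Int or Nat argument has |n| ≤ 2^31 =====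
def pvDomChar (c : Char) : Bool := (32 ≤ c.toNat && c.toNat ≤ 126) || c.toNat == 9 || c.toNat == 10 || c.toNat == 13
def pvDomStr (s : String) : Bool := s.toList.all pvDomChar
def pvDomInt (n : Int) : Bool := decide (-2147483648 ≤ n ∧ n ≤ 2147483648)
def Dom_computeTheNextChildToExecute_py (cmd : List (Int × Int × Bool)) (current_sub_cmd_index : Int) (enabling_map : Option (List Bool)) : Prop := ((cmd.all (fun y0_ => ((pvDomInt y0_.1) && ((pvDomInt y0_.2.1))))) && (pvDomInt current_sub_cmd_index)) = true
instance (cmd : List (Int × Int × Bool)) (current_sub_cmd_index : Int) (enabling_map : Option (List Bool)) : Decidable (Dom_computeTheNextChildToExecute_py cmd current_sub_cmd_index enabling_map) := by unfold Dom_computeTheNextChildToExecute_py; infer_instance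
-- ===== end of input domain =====

-- B replaces A's circular scan with a wrap flag by one comprehension collecting the valid
-- indices plus an argmin over the modular-distance key (objective: alternative; return value only).

-- ===== PORT A =====
-- the 'is it a valid command to execute' test of A, at index i (pyGet? = Python indexing)
def pvAValid (cmd : List (Int × Int × Bool)) (enabling_map : Option (List Bool)) (i : Int) : Bool :=
  (match PySem.List.pyGet? cmd i with
   | some t => t.2.2
   | none => false) &&
  (match enabling_map with
   | none => true
   | some m => match PySem.List.pyGet? m i with
     | some b => b
     | none => false)

-- A's 'while True' loop; fuel bounds the iterations (cmd.length is enough whenever the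
-- Python loop terminates inside Pre_; fuel 0 is unreachable there)
def pvALoop (cmd : List (Int × Int × Bool)) (enabling_map : Option (List Bool))
    (current : Int) : Nat → Int → Bool → Bool × Int
  | 0, _, eond => (eond, -1)
  | fuel + 1, si, eond =>
    let si' := PySem.Int.mod (si + 1) (cmd.length : Int)
    let eond' := if si' = 0 then true else eond
    if pvAValid cmd enabling_map si' then (eond', si')
    else if si' = current then (eond', -1)
    else pvALoop cmd enabling_map current fuel si' eond'

def computeTheNextChildToExecute_py (cmd : List (Int × Int × Bool)) (current_sub_cmd_index : Int) (enabling_map : Option (List Bool)) : Bool × Int :=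
  let current := min current_sub_cmd_index ((cmd.length : Int) - 1)
  pvALoop cmd enabling_map current cmd.length current false

-- ===== PORT B =====
-- B's validity test inside the comprehension
def pvBValid (cmd : List (Int × Int × Bool)) (enabling_map : Option (List Bool)) (i : Int) : Bool :=
  (match PySem.List.pyGet? cmd i with
   | some t => t.2.2
   | none => false) &&
  (match enabling_map with
   | none => true
   | some b_map => match PySem.List.pyGet? b_map i with
     | some b => b
     | none => false)

def computeTheNextChildToExecute_py_alt (cmd : List (Int × Int × Bool)) (current_sub_cmd_index : Int) (enabling_map : Option (List Bool)) : Bool × Int :=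
  let n : Int := cmd.length
  let current := min current_sub_cmd_index (n - 1)
  -- valid = [i for i in range(n) if ...]
  let valid := (PySem.List.pyRange 0 n 1).filter (fun i => pvBValid cmd enabling_map i)
  -- target = min(valid, key=lambda i: (i - current - 1) % n); empty → (True, -1)
  match PySem.List.min? valid (fun i => PySem.Int.mod (i - current - 1) n) with
  | none => (true, -1)
  | some target => (decide (target ≤ current), target)

-- ===== PRECONDITION & SPEC =====
-- Pre_ excludes: empty cmd (A raises ZeroDivisionError) and enabling maps shorter than cmd
-- (A can raise IndexError); and negative current_sub_cmd_index, outside the caller's natural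
-- domain, where A's stop condition 'starting_index == current_sub_cmd_index' can never fire,
-- so A diverges whenever no command is valid and otherwise returns a value shaped by the
-- leftover modular state (see cites).
def Pre_computeTheNextChildToExecute_py (cmd : List (Int × Int × Bool)) (current_sub_cmd_index : Int) (enabling_map : Option (List Bool)) : Prop :=
  cmd ≠ [] ∧ 0 ≤ current_sub_cmd_index ∧
    (enabling_map = none ∨ cmd.length ≤ (enabling_map.getD []).length)
instance (cmd : List (Int × Int × Bool)) (current_sub_cmd_index : Int) (enabling_map : Option (List Bool)) : Decidable (Pre_computeTheNextChildToExecute_py cmd current_sub_cmd_index enabling_map) := by unfold Pre_computeTheNextChildToExecute_py; infer_instance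

def pvWitness_computeTheNextChildToExecute_py : (List (Int × Int × Bool)) × Int × Option (List Bool) :=
  ([(1, 2, true), (3, 4, false)], 0, some [false, true])

-- On empty cmd A raises ZeroDivisionError from '% len(cmd)' while B finds no valid index and returns (True, -1).
def Raises_computeTheNextChildToExecute_py (cmd : List (Int × Int × Bool)) (current_sub_cmd_index : Int) (enabling_map : Option (List Bool)) : Prop :=
  cmd = []
instance (cmd : List (Int × Int × Bool)) (current_sub_cmd_index : Int) (enabling_map : Option (List Bool)) : Decidable (Raises_computeTheNextChildToExecute_py cmd current_sub_cmd_index enabling_map) := by unfold Raises_computeTheNextChildToExecute_py; infer_instance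
def pvRaiseWitness_computeTheNextChildToExecute_py : (List (Int × Int × Bool)) × Int × Option (List Bool) := ([], 0, none)
def pvRaiseWitnessOut_computeTheNextChildToExecute_py : Bool × Int := (true, -1)

def Spec_computeTheNextChildToExecute_py (cmd : List (Int × Int × Bool)) (current_sub_cmd_index : Int) (enabling_map : Option (List Bool)) (out : Bool × Int) : Prop := out = computeTheNextChildToExecute_py_alt cmd current_sub_cmd_index enabling_map
instance (cmd : List (Int × Int × Bool)) (current_sub_cmd_index : Int) (enabling_map : Option (List Bool)) (out : Bool × Int) : Decidable (Spec_computeTheNextChildToExecute_py cmd current_sub_cmd_index enabling_map out) := by unfold Spec_computeTheNextChildToExecute_py; infer_instance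

-- ===== CLAIM (what is proved, stated in full; the proofs are below) =====
def Claim_equal_computeTheNextChildToExecute_py : Prop := ∀ (cmd : List (Int × Int × Bool)) (current_sub_cmd_index : Int) (enabling_map : Option (List Bool)), Dom_computeTheNextChildToExecute_py cmd current_sub_cmd_index enabling_map → Pre_computeTheNextChildToExecute_py cmd current_sub_cmd_index enabling_map → Spec_computeTheNextChildToExecute_py cmd current_sub_cmd_index enabling_map (computeTheNextChildToExecute_py cmd current_sub_cmd_index enabling_map)

def Claim_raises_computeTheNextChildToExecute_py : Prop := (∀ (cmd : List (Int × Int × Bool)) (current_sub_cmd_index : Int) (enabling_map : Option (List Bool)), Dom_computeTheNextChildToExecute_py cmd current_sub_cmd_index enabling_map → Raises_computeTheNextChildToExecute_py cmd current_sub_cmd_index enabling_map → ¬ Pre_computeTheNextChildToExecute_py cmd current_sub_cmd_index enabling_map) ∧ (Dom_computeTheNextChildToExecute_py (pvRaiseWitness_computeTheNextChildToExecute_py.1) (pvRaiseWitness_computeTheNextChildToExecute_py.2.1) (pvRaiseWitness_computeTheNextChildToExecute_py.2.2) ∧ Raises_computeTheNextChildToExecute_py (pvRaiseWitness_computeTheNextChildToExecute_py.1)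 (pvRaiseWitness_computeTheNextChildToExecute_py.2.1) (pvRaiseWitness_computeTheNextChildToExecute_py.2.2) ∧ computeTheNextChildToExecute_py_alt (pvRaiseWitness_computeTheNextChildToExecute_py.1) (pvRaiseWitness_computeTheNextChildToExecute_py.2.1) (pvRaiseWitness_computeTheNextChildToExecute_py.2.2) = pvRaiseWitnessOut_computeTheNextChildToExecute_py)

-- ===== LEMMAS AND PROOFS =====

-- proof-side helper: first index of the list passing pvBValid (A's stopping behaviour
-- re-expressed as a scan; used only to bridge the two ports)
def pvBScan (cmd : List (Int × Int × Bool)) (enabling_map : Option (List Bool)) : List Int → Option Int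
  | [] => none
  | i :: rest => if pvBValid cmd enabling_map i then some i else pvBScan cmd enabling_map rest

-- the wrapped-pass result, as a named abbreviation for the lemmas
def pvP2 (cmd : List (Int × Int × Bool)) (enabling_map : Option (List Bool)) (current : Int) : Bool × Int :=
  match pvBScan cmd enabling_map (PySem.List.pyRange 0 (current + 1) 1) with
  | some i => (true, i)
  | none => (true, -1)

theorem pvValid_eq (cmd : List (Int × Int × Bool)) (em : Option (List Bool)) (i : Int) :
    pvAValid cmd em i = pvBValid cmd em i := rfl

theorem pvLoop_phase2 (cmd : List (Int × Int × Bool)) (em : Option (List Bool)) (current : Int)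
    (hcur : 0 ≤ current) (hlt : current < (cmd.length : Int)) :
    ∀ (fuel : Nat) (j : Int), 0 ≤ j → j < current → (current - j).toNat ≤ fuel →
      pvALoop cmd em current fuel j true =
        (match pvBScan cmd em (PySem.List.pyRange (j + 1) (current + 1) 1) with
         | some i => (true, i)
         | none => (true, -1)) := by
  intro fuel
  induction fuel with
  | zero => intro j hj0 hjc hf; omega
  | succ f ih =>
    intro j hj0 hjc hf
    have hn : 0 < (cmd.length : Int) := by omega
    have hmod : PySem.Int.mod (j + 1) (cmd.length : Int) = j + 1 := by
      rw [PySem.Int.mod_eq_emod_of_pos hn]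
      exact Int.emod_eq_of_lt (by omega) (by omega)
    have hcons : PySem.List.pyRange (j + 1) (current + 1) 1 =
        (j + 1) :: PySem.List.pyRange (j + 1 + 1) (current + 1) 1 :=
      PySem.List.pyRange_one_cons (by omega)
    rw [hcons]
    simp only [pvALoop, hmod, pvBScan]
    have hne0 : ¬ (j + 1 = 0) := by omega
    simp only [if_neg hne0]
    by_cases hv : pvAValid cmd em (j + 1)
    · simp [hv, ← pvValid_eq]
    · rw [if_neg hv, ← pvValid_eq, if_neg hv]
      by_cases hstop : j + 1 = current
      · rw [if_pos hstop]
        have hnil : PySem.List.pyRange (j + 1 + 1) (current + 1) 1 = [] :=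
          PySem.List.pyRange_one_eq_nil (by omega)
        rw [hnil]
        simp [pvBScan]
      · rw [if_neg hstop]
        exact ih (j + 1) (by omega) (by omega) (by omega)

theorem pvLoop_entry (cmd : List (Int × Int × Bool)) (em : Option (List Bool)) (current : Int)
    (hcur : 0 ≤ current) (hlt : current < (cmd.length : Int)) :
    ∀ (fuel : Nat) (eond : Bool), (current + 1).toNat ≤ fuel →
      pvALoop cmd em current fuel ((cmd.length : Int) - 1) eond = pvP2 cmd em current := by
  intro fuel eond hf
  have hn : 0 < (cmd.length : Int) := by omega
  obtain ⟨f, rfl⟩ : ∃ f, fuel = f + 1 := ⟨fuel - 1, by omega⟩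
  have hmod : PySem.Int.mod ((cmd.length : Int) - 1 + 1) (cmd.length : Int) = 0 := by
    rw [PySem.Int.mod_eq_emod_of_pos hn]
    simp
  have hcons : PySem.List.pyRange 0 (current + 1) 1 =
      (0 : Int) :: PySem.List.pyRange 1 (current + 1) 1 :=
    PySem.List.pyRange_one_cons (by omega)
  simp only [pvALoop, hmod, pvP2, hcons, pvBScan]
  by_cases hv : pvAValid cmd em 0
  · simp [hv, ← pvValid_eq]
  · rw [if_neg hv, ← pvValid_eq, if_neg hv]
    by_cases hstop : (0 : Int) = current
    · rw [if_pos hstop]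
      have : PySem.List.pyRange 1 (current + 1) 1 = [] :=
        PySem.List.pyRange_one_eq_nil (by omega)
      rw [this]
      simp [pvBScan]
    · rw [if_neg hstop]
      have := pvLoop_phase2 cmd em current hcur hlt f 0 le_rfl (by omega) (by omega)
      simpa using this

theorem pvLoop_phase1 (cmd : List (Int × Int × Bool)) (em : Option (List Bool)) (current : Int)
    (hcur : 0 ≤ current) (hlt : current < (cmd.length : Int)) :
    ∀ (fuel : Nat) (si : Int), current ≤ si → si < (cmd.length : Int) →
      ((cmd.length : Int) - si + current).toNat ≤ fuel →
      pvALoop cmd em current fuel si false =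
        (match pvBScan cmd em (PySem.List.pyRange (si + 1) (cmd.length : Int) 1) with
         | some i => (false, i)
         | none => pvP2 cmd em current) := by
  intro fuel
  induction fuel with
  | zero => intro si h1 h2 h3; omega
  | succ f ih =>
    intro si h1 h2 h3
    have hn : 0 < (cmd.length : Int) := by omega
    by_cases hend : si = (cmd.length : Int) - 1
    · subst hend
      have hnil : PySem.List.pyRange ((cmd.length : Int) - 1 + 1) (cmd.length : Int) 1 = [] :=
        PySem.List.pyRange_one_eq_nil (by omega)
      rw [hnil]
      simp only [pvBScan]
      exact pvLoop_entry cmd em current hcur hlt (f + 1) false (by omega)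
    · have hmod : PySem.Int.mod (si + 1) (cmd.length : Int) = si + 1 := by
        rw [PySem.Int.mod_eq_emod_of_pos hn]
        exact Int.emod_eq_of_lt (by omega) (by omega)
      have hcons : PySem.List.pyRange (si + 1) (cmd.length : Int) 1 =
          (si + 1) :: PySem.List.pyRange (si + 1 + 1) (cmd.length : Int) 1 :=
        PySem.List.pyRange_one_cons (by omega)
      rw [hcons]
      simp only [pvALoop, hmod, pvBScan]
      have hne0 : ¬ (si + 1 = 0) := by omega
      simp only [if_neg hne0]
      by_cases hv : pvAValid cmd em (si + 1)
      · simp [hv, ← pvValid_eq]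
      · rw [if_neg hv, ← pvValid_eq, if_neg hv]
        have hstop : ¬ (si + 1 = current) := by omega
        rw [if_neg hstop]
        exact ih (si + 1) (by omega) (by omega) (by omega)

-- B-side bridging lemmas

theorem pvScan_eq_head_filter (cmd : List (Int × Int × Bool)) (em : Option (List Bool)) :
    ∀ l : List Int, pvBScan cmd em l = (l.filter (fun i => pvBValid cmd em i)).head? := by
  intro l
  induction l with
  | nil => rfl
  | cons i rest ih =>
    by_cases hv : pvBValid cmd em i
    · simp [pvBScan, List.filter, hv]
    · simp [pvBScan, List.filter, hv, ih]

-- min with key returns the unique strict minimizer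
theorem pvMin?_eq_of_strict (xs : List Int) (key : Int → Int) (m : Int)
    (hm : m ∈ xs) (h : ∀ y ∈ xs, y ≠ m → key m < key y) :
    PySem.List.min? xs key = some m := by
  cases hx : PySem.List.min? xs key with
  | none =>
    rw [PySem.List.min?_eq_none_iff] at hx
    subst hx; cases hm
  | some m' =>
    have hmem := PySem.List.min?_mem hx
    have hmin := PySem.List.min?_isMin hx m hm
    by_cases he : m' = m
    · rw [he]
    · exact absurd hmin (by have := h m' hmem he; omega)

-- the modular key, evaluated on both sides of the wrap point
theorem pvKey_eval (n current i : Int) (hn : 0 < n) (hc0 : 0 ≤ current) (hc : current < n)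
    (hi0 : 0 ≤ i) (hin : i < n) :
    PySem.Int.mod (i - current - 1) n =
      if current < i then i - current - 1 else i - current - 1 + n := by
  rw [PySem.Int.mod_eq_emod_of_pos hn]
  split_ifs with hci
  · exact Int.emod_eq_of_lt (by omega) (by omega)
  · have h1 : (i - current - 1) % n = (i - current - 1 + n) % n := by
      conv_rhs => rw [show i - current - 1 + n = i - current - 1 + n * 1 by ring]
      rw [Int.add_mul_emod_self_left]
    rw [h1, Int.emod_eq_of_lt (by omega) (by omega)]

-- ===== VERDICT (by name: the statement is the Claim_ definition above) =====
theorem computeTheNextChildToExecute_py_spec : Claim_equal_computeTheNextChildToExecute_py := by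
  intro cmd idx em _hDom hPre
  obtain ⟨hne, hidx, _⟩ := hPre
  have hn : 0 < (cmd.length : Int) := by
    have := List.length_pos_iff.mpr hne
    omega
  unfold Spec_computeTheNextChildToExecute_py
  unfold computeTheNextChildToExecute_py computeTheNextChildToExecute_py_alt
  dsimp only []
  set n : Int := (cmd.length : Int) with hndef
  set current := min idx (n - 1) with hcurdef
  have hcur : 0 ≤ current := by omega
  have hlt : current < n := by omega
  rw [pvLoop_phase1 cmd em current hcur hlt cmd.length current (le_refl _) hlt (by omega)]
  -- split the comprehension's range at the wrap point
  have hsplit : PySem.List.pyRange 0 n 1 =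
      PySem.List.pyRange 0 (current + 1) 1 ++ PySem.List.pyRange (current + 1) n 1 :=
    PySem.List.pyRange_one_append 0 (current + 1) n (by omega) (by omega)
  rw [hsplit, List.filter_append]
  set p := fun i => pvBValid cmd em i with hpdef
  set V1 := (PySem.List.pyRange 0 (current + 1) 1).filter p with hV1
  set V2 := (PySem.List.pyRange (current + 1) n 1).filter p with hV2
  have hmemV1 : ∀ y ∈ V1, 0 ≤ y ∧ y ≤ current := by
    intro y hy
    have := (List.mem_filter.mp hy).1
    have := (PySem.List.mem_pyRange_one).mp this
    omega
  have hmemV2 : ∀ y ∈ V2, current < y ∧ y < n := by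
    intro y hy
    have := (List.mem_filter.mp hy).1
    have := (PySem.List.mem_pyRange_one).mp this
    omega
  have hpw1 : V1.Pairwise (· < ·) :=
    List.Pairwise.sublist List.filter_sublist (PySem.List.pairwise_lt_pyRange_one 0 (current + 1))
  have hpw2 : V2.Pairwise (· < ·) :=
    List.Pairwise.sublist List.filter_sublist (PySem.List.pairwise_lt_pyRange_one (current + 1) n)
  set key := fun i : Int => PySem.Int.mod (i - current - 1) n with hkey
  match hV2e : V2 with
  | h :: t =>
    -- phase-1 hit: A returns (false, h); B's argmin is h
    rw [pvScan_eq_head_filter, ← hpdef, ← hV2]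
    have hh : current < h ∧ h < n := hmemV2 h List.mem_cons_self
    have hmin : PySem.List.min? (V1 ++ h :: t) key = some h := by
      apply pvMin?_eq_of_strict
      · exact List.mem_append_right _ List.mem_cons_self
      · intro y hy hyne
        rcases List.mem_append.mp hy with hy1 | hy2
        · have hb := hmemV1 y hy1
          simp only [hkey]
          rw [pvKey_eval n current h hn hcur hlt (by omega) (by omega),
              pvKey_eval n current y hn hcur hlt (by omega) (by omega)]
          rw [if_pos hh.1, if_neg (by omega)]
          omega
        · have hb := hmemV2 y hy2
          have hlt' : h < y := by
            rcases List.mem_cons.mp hy2 with rfl | hyt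
            · exact absurd rfl hyne
            · exact (List.pairwise_cons.mp hpw2).1 y hyt
          simp only [hkey]
          rw [pvKey_eval n current h hn hcur hlt (by omega) (by omega),
              pvKey_eval n current y hn hcur hlt (by omega) (by omega)]
          rw [if_pos hh.1, if_pos hb.1]
          omega
    rw [hmin]
    simp [decide_eq_false (by omega : ¬ h ≤ current)]
  | [] =>
    rw [pvScan_eq_head_filter, ← hpdef, ← hV2]
    simp only [List.head?_nil, List.append_nil]
    unfold pvP2
    rw [pvScan_eq_head_filter, ← hpdef, ← hV1]
    match hV1e : V1 with
    | g :: s =>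
      -- wrapped hit: A returns (true, g); B's argmin is g
      have hg : 0 ≤ g ∧ g ≤ current := hmemV1 g List.mem_cons_self
      have hmin : PySem.List.min? (g :: s) key = some g := by
        apply pvMin?_eq_of_strict
        · exact List.mem_cons_self
        · intro y hy hyne
          rcases List.mem_cons.mp hy with rfl | hyt
          · exact absurd rfl hyne
          · have hb := hmemV1 y (List.mem_cons_of_mem _ hyt)
            have hlt' : g < y := (List.pairwise_cons.mp hpw1).1 y hyt
            simp only [hkey]
            rw [pvKey_eval n current g hn hcur hlt (by omega) (by omega),
                pvKey_eval n current y hn hcur hlt (by omega) (by omega)]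
            rw [if_neg (by omega), if_neg (by omega)]
            omega
      rw [hmin]
      simp [decide_eq_true (by omega : g ≤ current)]
    | [] =>
      have : PySem.List.min? ([] : List Int) key = none := by
        rw [PySem.List.min?_eq_none_iff]
      rw [this]
      rfl

@[simp] theorem computeTheNextChildToExecute_py_raises : Claim_raises_computeTheNextChildToExecute_py := by
  unfold Claim_raises_computeTheNextChildToExecute_py
  constructor
  · intro cmd idx em _ hR hP
    exact hP.1 hR
  · exact ⟨by decide, by decide, by decide⟩
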